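-- pv_equiv track=rewrite | github.com/guozanhua/3d-fixes | extract_unity_shaders.py | compress_keywords
-- ===== SOURCE A (Python) =====
-- abbreviations = (
--     ('DIRECTIONAL', 'DIR'),
--     ('COOKIE', 'CK'),
--     ('POINT', 'PT'),
--     ('SHADOWS', 'SHDW'),
--     ('SOFT', 'SFT'),
--     ('CUBE', 'CBE'),
--     ('SCREEN', 'SCN'),
--     ('NATIVE', 'NTV'),
--     ('DEPTH', 'DEP'),
--     ('OFF', 'OF'),
--     ('SPOT', 'SPT'),
--     ('SUNSHINE', 'SUN'),
--     ('FILTER', 'FLT'),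
--     ('HARD', 'HRD'),
--     ('SOFT', 'SFT'),
--     ('DISABLED', 'DIS'),
-- )
--
-- def abbreviate(word):
--     for a in abbreviations:
--         word = word.replace(*a)
--     return word
--
-- def compress_keywords(keywords):
--     keywords = map(abbreviate, keywords)
--     split = [x.rsplit('_', 1) for x in keywords]
--
--     ret = []
--
--     ret.extend([x[0] for x in split if len(x) == 1])
--     multiword = [x for x in split if len(x) > 1]
--     for word in set([x[0] for x in multiword]):
--         remaining = [x[1] for x in multiword if x[0] == word]
--         if len(remaining) == 1:
--             ret.append('%s_%s' % (word, ''.join(remaining)))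
--         else:
--             ret.append('%s_(%s)' % (word, '+'.join(remaining)))
--     return ' '.join(sorted(ret))
-- ===== SOURCE B (Python) =====
-- abbreviations = (
--     ('DIRECTIONAL', 'DIR'),
--     ('COOKIE', 'CK'),
--     ('POINT', 'PT'),
--     ('SHADOWS', 'SHDW'),
--     ('SOFT', 'SFT'),
--     ('CUBE', 'CBE'),
--     ('SCREEN', 'SCN'),
--     ('NATIVE', 'NTV'),
--     ('DEPTH', 'DEP'),
--     ('OFF', 'OF'),
--     ('SPOT', 'SPT'),
--     ('SUNSHINE', 'SUN'),
--     ('FILTER', 'FLT'),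
--     ('HARD', 'HRD'),
--     ('SOFT', 'SFT'),
--     ('DISABLED', 'DIS'),
-- )
--
-- def abbreviate(word):
--     for a in abbreviations:
--         word = word.replace(*a)
--     return word
--
-- def compress_keywords(keywords):
--     # Single pass: group suffixes by prefix in an insertion-ordered dict,
--     # instead of re-scanning the multiword list once per distinct prefix.
--     singles = []
--     groups = {}
--     for kw in keywords:
--         parts = abbreviate(kw).rsplit('_', 1)
--         if len(parts) == 1:
--             singles.append(parts[0])
--         else:
--             groups.setdefault(parts[0], []).append(parts[1])
--     out = singles
--     for word, rest in groups.items():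
--         if len(rest) == 1:
--             out.append(word + '_' + rest[0])
--         else:
--             out.append(word + '_(' + '+'.join(rest) + ')')
--     return ' '.join(sorted(out))
-- ===== Notes on version B (the rewrite author's own statement) =====
-- stated objective: alternative
-- what changed: Replaces A's build-all-splits-then-rescan-the-multiword-list-once-per-distinct-prefix (set + repeated list-comprehension filters) with a single pass that groups suffixes by prefix in an insertion-ordered dict.
import Mathlib
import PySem

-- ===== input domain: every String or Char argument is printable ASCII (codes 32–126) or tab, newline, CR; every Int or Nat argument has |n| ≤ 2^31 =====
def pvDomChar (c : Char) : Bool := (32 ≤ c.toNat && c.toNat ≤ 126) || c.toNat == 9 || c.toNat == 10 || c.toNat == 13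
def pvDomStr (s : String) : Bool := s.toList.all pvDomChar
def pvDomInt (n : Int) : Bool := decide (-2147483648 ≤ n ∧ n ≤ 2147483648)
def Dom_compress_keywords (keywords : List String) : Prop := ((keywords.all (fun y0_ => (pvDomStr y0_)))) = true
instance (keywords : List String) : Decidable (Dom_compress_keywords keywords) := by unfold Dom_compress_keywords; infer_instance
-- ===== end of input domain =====

-- B replaces A's per-distinct-prefix rescans of the multiword list with one grouping pass over
-- an insertion-ordered dict (objective: alternative; same measured cost on the generated inputs).


-- ===== PORT A =====
def abbreviationsL : List (String × String) :=
  [("DIRECTIONAL", "DIR"), ("COOKIE", "CK"), ("POINT", "PT"), ("SHADOWS", "SHDW"),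
   ("SOFT", "SFT"), ("CUBE", "CBE"), ("SCREEN", "SCN"), ("NATIVE", "NTV"),
   ("DEPTH", "DEP"), ("OFF", "OF"), ("SPOT", "SPT"), ("SUNSHINE", "SUN"),
   ("FILTER", "FLT"), ("HARD", "HRD"), ("SOFT", "SFT"), ("DISABLED", "DIS")]

def abbreviate (word : String) : String :=
  abbreviationsL.foldl (fun w a => PySem.Str.replace w a.1 a.2) word

-- Python s.rsplit('_', 1), exact: cut at the LAST '_' (rfind) if any, else the whole string.
def rsplit1 (s : String) : List String :=
  if PySem.Chars.rfind s.toList ['_'] < 0 then [s]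
  else [String.ofList (s.toList.take (PySem.Chars.rfind s.toList ['_']).toNat),
        String.ofList (s.toList.drop ((PySem.Chars.rfind s.toList ['_']).toNat + 1))]

def compress_keywords (keywords : List String) : String :=
  let kws := keywords.map abbreviate
  let split := kws.map rsplit1
  let ret1 := (split.filter (fun x => x.length == 1)).map (fun x => x.headD "")
  let multiword := split.filter (fun x => decide (1 < x.length))
  let ret := (PySem.Set.ofList (multiword.map (fun x => x.headD ""))).foldl
    (fun ret word =>
      let remaining := (multiword.filter (fun x => x.headD "" == word)).map
        (fun x => (PySem.List.pyGet? x 1).getD "")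
      if remaining.length == 1 then ret ++ [word ++ "_" ++ PySem.Str.join "" remaining]
      else ret ++ [word ++ "_(" ++ PySem.Str.join "+" remaining ++ ")"]) ret1
  PySem.Str.join " " (PySem.List.sorted ret id)

-- ===== PORT B =====
def renderGroup (p : String × List String) : String :=
  if p.2.length == 1 then p.1 ++ "_" ++ p.2.headD ""
  else p.1 ++ "_(" ++ PySem.Str.join "+" p.2 ++ ")"

def bStep (st : List String × PySem.Dict String (List String)) (kw : String) :
    List String × PySem.Dict String (List String) :=
  let parts := rsplit1 (abbreviate kw)
  if parts.length == 1 then (st.1 ++ [parts.headD ""], st.2)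
  else (st.1, st.2.insert (parts.headD "")
        (st.2.getD (parts.headD "") [] ++ [(PySem.List.pyGet? parts 1).getD ""]))

def compress_keywords_alt (keywords : List String) : String :=
  let st := keywords.foldl bStep ([], PySem.Dict.mk [])
  let out := st.1 ++ st.2.items.map renderGroup
  PySem.Str.join " " (PySem.List.sorted out id)

-- ===== PRECONDITION & SPEC =====
def Spec_compress_keywords (keywords : List String) (out : String) : Prop := out = compress_keywords_alt keywords
instance (keywords : List String) (out : String) : Decidable (Spec_compress_keywords keywords out) := by unfold Spec_compress_keywords; infer_instance

-- ===== CLAIM (what is proved, stated in full; the proofs are below) =====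
def Claim_equal_compress_keywords : Prop := ∀ (keywords : List String), Dom_compress_keywords keywords → Spec_compress_keywords keywords (compress_keywords keywords)

-- ===== LEMMAS AND PROOFS =====

-- the (prefix, suffix) pairs of the multiword keywords, in order
def pairsOf (ks : List String) : List (String × String) :=
  ((ks.map (fun kw => rsplit1 (abbreviate kw))).filter (fun x => decide (1 < x.length))).map
    (fun x => (x.headD "", (PySem.List.pyGet? x 1).getD ""))

def singlesOf (ks : List String) : List String :=
  ((ks.map (fun kw => rsplit1 (abbreviate kw))).filter (fun x => x.length == 1)).map
    (fun x => x.headD "")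

-- first-occurrence list of keys of qs not already in seen (seen is read only through membership)
def newKeys (seen : List String) : List String → List String
  | [] => []
  | w :: ws => if seen.contains w then newKeys seen ws else w :: newKeys (w :: seen) ws

def dStep (d : PySem.Dict String (List String)) (q : String × String) :
    PySem.Dict String (List String) :=
  d.insert q.1 (d.getD q.1 [] ++ [q.2])

lemma rsplit1_len (s : String) : (rsplit1 s).length = 1 ∨ (rsplit1 s).length = 2 := by
  simp only [rsplit1]; split <;> simp

lemma newKeys_congr (s1 s2 : List String) (h : ∀ w, w ∈ s1 ↔ w ∈ s2) :
    ∀ ws, newKeys s1 ws = newKeys s2 ws := by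
  intro ws
  induction ws generalizing s1 s2 with
  | nil => rfl
  | cons w ws ih =>
    have hc : s1.contains w = s2.contains w := by simp [h w]
    simp only [newKeys, hc]
    split
    · exact ih s1 s2 h
    · rw [ih (w :: s1) (w :: s2) (by intro x; simp [h x])]

lemma set_ofList_eq_newKeys (ws : List String) : PySem.Set.ofList ws = newKeys [] ws := by
  suffices h : ∀ ws acc, List.foldl PySem.Set.add acc ws = acc ++ newKeys acc ws by
    simpa [PySem.Set.ofList, PySem.Set.empty] using h ws []
  intro ws
  induction ws with
  | nil => intro acc; simp [newKeys]
  | cons w ws ih =>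
    intro acc
    simp only [List.foldl_cons, PySem.Set.add, newKeys]
    by_cases hc : w ∈ acc
    · simp only [show acc.contains w = true by simp [hc]]
      simp [ih acc, hc]
    · simp only [show acc.contains w = false by simp [hc]]
      simp only [Bool.false_eq_true, if_false]
      rw [ih (acc ++ [w]), newKeys_congr (acc ++ [w]) (w :: acc) (by intro x; simp; tauto)]
      simp [hc]

lemma newKeys_not_mem_seen (ws : List String) :
    ∀ (seen : List String) (w : String), w ∈ newKeys seen ws → w ∉ seen := by
  induction ws with
  | nil => intro seen w h; cases h
  | cons x ws ih =>
    intro seen w h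
    simp only [newKeys] at h
    split at h
    · exact ih seen w h
    · rcases List.mem_cons.mp h with h | h
      · subst h; simpa using ‹¬ seen.contains w = true›
      · intro hw; exact ih (x :: seen) w h (List.mem_cons_of_mem _ hw)

lemma find_key (its : List (String × List String)) (hnd : (its.map Prod.fst).Nodup)
    (p : String × List String) (hp : p ∈ its) :
    its.find? (fun r => r.1 == p.1) = some p := by
  induction its with
  | nil => cases hp
  | cons a l ih =>
    rcases List.mem_cons.mp hp with h | h
    · subst h; simp [List.find?]
    · have ha : a.1 ≠ p.1 := by
        intro he
        have : a.1 ∉ l.map Prod.fst := (List.nodup_cons.mp hnd).1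
        exact this (he ▸ List.mem_map_of_mem h)
      simp only [List.find?, show (a.1 == p.1) = false by simpa using ha]
      exact ih (List.nodup_cons.mp hnd).2 h

lemma join_len1 (vs : List String) (h : vs.length = 1) :
    PySem.Str.join "" vs = vs.headD "" := by
  match vs, h with
  | [v], _ => simp [PySem.Str.join, PySem.Chars.join, List.intercalate]

-- the grouping lemma: folding dStep over qs, characterised on the items list
lemma dfold_items (qs : List (String × String)) :
    ∀ (its : List (String × List String)), (its.map Prod.fst).Nodup →
    (qs.foldl dStep ⟨its⟩).items
      = its.map (fun p => (p.1, p.2 ++ (qs.filter (fun q => q.1 == p.1)).map Prod.snd))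
        ++ (newKeys (its.map Prod.fst) (qs.map Prod.fst)).map
            (fun w => (w, (qs.filter (fun q => q.1 == w)).map Prod.snd)) := by
  induction qs with
  | nil => intro its _; simp [newKeys]
  | cons q qs ih =>
    intro its hnd
    simp only [List.foldl_cons]
    by_cases hq : q.1 ∈ its.map Prod.fst
    · -- key already present: the matching entry's value list grows
      have hcont : (PySem.Dict.mk its).contains q.1 = true := by
        simp only [PySem.Dict.contains]
        rw [List.any_eq_true]
        rcases List.mem_map.mp hq with ⟨p, hp, he⟩
        exact ⟨p, hp, by simp [he]⟩
      have hitems : (dStep (PySem.Dict.mk its) q).items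
          = its.map (fun p => if p.1 = q.1 then (p.1, p.2 ++ [q.2]) else p) := by
        simp only [dStep, PySem.Dict.insert, hcont, if_pos]
        apply List.map_congr_left
        intro p hp
        by_cases he : p.1 = q.1
        · have hget : PySem.Dict.getD (PySem.Dict.mk its) q.1 [] = p.2 := by
            simp [PySem.Dict.getD, PySem.Dict.get?, ← he, find_key its hnd p hp]
          simp [he, hget]
        · simp [he]
      have hkeys : ((dStep (PySem.Dict.mk its) q).items.map Prod.fst) = its.map Prod.fst := by
        rw [hitems, List.map_map]
        apply List.map_congr_left
        intro p _
        by_cases he : p.1 = q.1 <;> simp [he]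
      have hih := ih (dStep (PySem.Dict.mk its) q).items (by rw [hkeys]; exact hnd)
      rw [show (PySem.Dict.mk ((dStep (PySem.Dict.mk its) q).items)) = dStep (PySem.Dict.mk its) q from rfl] at hih
      rw [hih, hkeys, hitems, List.map_map]
      have hnk : newKeys (its.map Prod.fst) ((q :: qs).map Prod.fst)
          = newKeys (its.map Prod.fst) (qs.map Prod.fst) := by
        simp only [List.map_cons, newKeys]
        rw [if_pos (by simpa using hq)]
      rw [hnk]
      congr 1
      · apply List.map_congr_left
        intro p hp
        by_cases he : p.1 = q.1
        · simp [he, List.filter_cons, List.append_assoc]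
        · simp [Function.comp, he, List.filter_cons, show ¬ (q.1 = p.1) from fun h => he h.symm]
      · apply List.map_congr_left
        intro w hw
        have hwq : w ≠ q.1 := by
          intro he; exact newKeys_not_mem_seen _ _ _ hw (he ▸ hq)
        simp [List.filter_cons, show ¬ (q.1 = w) from fun h => hwq h.symm]
    · -- new key: appended at the end
      have hcont : (PySem.Dict.mk its).contains q.1 = false := by
        simp only [PySem.Dict.contains]
        rw [List.any_eq_false]
        intro p hp
        simp only [beq_iff_eq]
        intro he
        exact hq (he ▸ List.mem_map_of_mem hp)
      have hget : PySem.Dict.getD (PySem.Dict.mk its) q.1 [] = [] := by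
        have : its.find? (fun r => r.1 == q.1) = none := by
          rw [List.find?_eq_none]
          intro p hp
          simp only [beq_iff_eq]
          intro he
          exact hq (he ▸ List.mem_map_of_mem hp)
        simp [PySem.Dict.getD, PySem.Dict.get?, this]
      have hitems : (dStep (PySem.Dict.mk its) q).items = its ++ [(q.1, [q.2])] := by
        simp [dStep, PySem.Dict.insert, hcont, hget]
      have hnd' : ((its ++ [(q.1, [q.2])]).map Prod.fst).Nodup := by
        simp only [List.map_append, List.map_cons, List.map_nil]
        simp only [List.nodup_append]
        refine ⟨hnd, List.nodup_singleton _, ?_⟩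
        intro a ha b hb
        exact fun he => hq ((he.trans (List.mem_singleton.mp hb)) ▸ ha)
      have hih := ih (its ++ [(q.1, [q.2])]) hnd'
      have hd : dStep (PySem.Dict.mk its) q = PySem.Dict.mk (its ++ [(q.1, [q.2])]) := by
        rw [← hitems]
      rw [hd, hih]
      have hnk : newKeys (its.map Prod.fst) ((q :: qs).map Prod.fst)
          = q.1 :: newKeys (q.1 :: its.map Prod.fst) (qs.map Prod.fst) := by
        simp only [List.map_cons, newKeys]
        rw [if_neg (by simpa using hq)]
      rw [hnk]
      simp only [List.map_append, List.map_cons, List.map_nil, List.nil_append]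
      rw [newKeys_congr ((its.map Prod.fst) ++ [q.1]) (q.1 :: its.map Prod.fst)
        (by intro x; simp; tauto)]
      rw [List.append_assoc]
      congr 1
      · apply List.map_congr_left
        intro p hp
        have he : p.1 ≠ q.1 := by
          intro h; exact hq (h ▸ List.mem_map_of_mem hp)
        simp [List.filter_cons, show ¬ (q.1 = p.1) from fun h => he h.symm]
      · simp only [List.map_cons, List.cons_append, List.nil_append]
        congr 1
        · simp [List.filter_cons]
        · apply List.map_congr_left
          intro w hw
          have hwq : w ≠ q.1 := by
            intro he
            exact newKeys_not_mem_seen _ _ _ hw (by simp [he])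
          simp [List.filter_cons, show ¬ (q.1 = w) from fun h => hwq h.symm]

-- A's per-word fold appends exactly the rendered group for each word
lemma a_fold_renders (ws : List String) (rem : String → List String) (acc : List String) :
    ws.foldl (fun ret word =>
      if (rem word).length == 1 then ret ++ [word ++ "_" ++ PySem.Str.join "" (rem word)]
      else ret ++ [word ++ "_(" ++ PySem.Str.join "+" (rem word) ++ ")"]) acc
    = acc ++ ws.map (fun w => renderGroup (w, rem w)) := by
  have hfun : (fun (ret : List String) (word : String) =>
      if (rem word).length == 1 then ret ++ [word ++ "_" ++ PySem.Str.join "" (rem word)]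
      else ret ++ [word ++ "_(" ++ PySem.Str.join "+" (rem word) ++ ")"])
      = fun ret word => ret ++ [renderGroup (word, rem word)] := by
    funext ret word
    simp only [renderGroup]
    by_cases h : (rem word).length = 1
    · simp only [h]
      rw [join_len1 _ h]
      simp
    · simp only [show ((rem word).length == 1) = false by simpa using h]
      simp
  rw [hfun, PySem.List.foldl_append_singleton_eq_map]

lemma b_fold_char (ks : List String) :
    ∀ (s : List String) (d : PySem.Dict String (List String)),
    ks.foldl bStep (s, d) = (s ++ singlesOf ks, (pairsOf ks).foldl dStep d) := by
  induction ks with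
  | nil => intro s d; simp [singlesOf, pairsOf]
  | cons kw ks ih =>
    intro s d
    simp only [List.foldl_cons]
    rcases rsplit1_len (abbreviate kw) with h1 | h2
    · have hb : bStep (s, d) kw = (s ++ [(rsplit1 (abbreviate kw)).headD ""], d) := by
        simp [bStep, h1]
      rw [hb, ih]
      have hs : singlesOf (kw :: ks) = (rsplit1 (abbreviate kw)).headD "" :: singlesOf ks := by
        simp [singlesOf, List.filter_cons, h1]
      have hp : pairsOf (kw :: ks) = pairsOf ks := by
        simp [pairsOf, List.filter_cons, h1]
      rw [hs, hp, List.append_assoc]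
      rfl
    · have hb : bStep (s, d) kw = (s, dStep d ((rsplit1 (abbreviate kw)).headD "",
          (PySem.List.pyGet? (rsplit1 (abbreviate kw)) 1).getD "")) := by
        simp [bStep, dStep, h2]
      rw [hb, ih]
      have hs : singlesOf (kw :: ks) = singlesOf ks := by
        simp [singlesOf, List.filter_cons, h2]
      have hp : pairsOf (kw :: ks) = ((rsplit1 (abbreviate kw)).headD "",
          (PySem.List.pyGet? (rsplit1 (abbreviate kw)) 1).getD "") :: pairsOf ks := by
        simp [pairsOf, List.filter_cons, h2]
      rw [hs, hp, List.foldl_cons]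

lemma a_out (ks : List String) :
    List.foldl
      (fun ret word =>
        if ((List.map (fun x => (PySem.List.pyGet? x 1).getD "")
              (List.filter (fun x => x.headD "" == word)
                (List.filter (fun x => decide (1 < x.length))
                  (List.map rsplit1 (List.map abbreviate ks))))).length == 1) = true then
          ret ++ [word ++ "_" ++
            PySem.Str.join ""
              (List.map (fun x => (PySem.List.pyGet? x 1).getD "")
                (List.filter (fun x => x.headD "" == word)
                  (List.filter (fun x => decide (1 < x.length))
                    (List.map rsplit1 (List.map abbreviate ks)))))]
        else
          ret ++ [word ++ "_(" ++
              PySem.Str.join "+"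
                (List.map (fun x => (PySem.List.pyGet? x 1).getD "")
                  (List.filter (fun x => x.headD "" == word)
                    (List.filter (fun x => decide (1 < x.length))
                      (List.map rsplit1 (List.map abbreviate ks))))) ++ ")"])
      (List.map (fun x => x.headD "")
        (List.filter (fun x => x.length == 1) (List.map rsplit1 (List.map abbreviate ks))))
      (PySem.Set.ofList
        (List.map (fun x => x.headD "")
          (List.filter (fun x => decide (1 < x.length)) (List.map rsplit1 (List.map abbreviate ks)))))
    = singlesOf ks ++ (newKeys [] ((pairsOf ks).map Prod.fst)).map
        (fun w => renderGroup (w, ((pairsOf ks).filter (fun q => q.1 == w)).map Prod.snd)) := by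
  rw [set_ofList_eq_newKeys]
  rw [a_fold_renders _ (fun word => (List.map (fun x => (PySem.List.pyGet? x 1).getD "")
    (List.filter (fun x => x.headD "" == word)
      (List.filter (fun x => decide (1 < x.length)) (List.map rsplit1 (List.map abbreviate ks))))))]
  simp only [singlesOf, pairsOf, List.map_map, List.filter_map, Function.comp_def]

lemma b_out (ks : List String) :
    (List.foldl bStep ([], PySem.Dict.mk []) ks).1 ++
      List.map renderGroup (List.foldl bStep ([], PySem.Dict.mk []) ks).2.items
    = singlesOf ks ++ (newKeys [] ((pairsOf ks).map Prod.fst)).map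
        (fun w => renderGroup (w, ((pairsOf ks).filter (fun q => q.1 == w)).map Prod.snd)) := by
  rw [b_fold_char ks [] (PySem.Dict.mk [])]
  rw [dfold_items (pairsOf ks) [] (by simp)]
  simp [List.map_map]

-- ===== VERDICT (by name: the statement is the Claim_ definition above) =====
theorem compress_keywords_spec : Claim_equal_compress_keywords := by
  intro ks _
  unfold Spec_compress_keywords
  simp only [compress_keywords, compress_keywords_alt]
  rw [a_out ks, b_out ks]
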